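-- pv_equiv track=rewrite | github.com/kubeckaj/JKCS2.1 | JKQC/src/extract_clusters.py | dash_comment
-- ===== SOURCE A (Python) =====
-- def dash_comment(input_array):
--   #removes comment
--   #['1','sa','24','b','_','25',"-","26"] -> ['1','sa','24','b']
--   output_array = [input_array]
--   for element in range(len(input_array)):
--     if input_array[element] == "-" or input_array[element] == "_":
--       output_array = []
--       partbefore = input_array[0:element]
--       output_array.append(partbefore)
--       break
--   return output_array
-- ===== SOURCE B (Python) =====
-- def dash_comment(input_array):
--     # membership-first: scan per delimiter, cut at the smallest index present
--     has_dash = "-" in input_array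
--     has_under = "_" in input_array
--     if not has_dash and not has_under:
--         return [input_array]
--     cuts = []
--     if has_dash:
--         cuts.append(input_array.index("-"))
--     if has_under:
--         cuts.append(input_array.index("_"))
--     return [input_array[:min(cuts)]]
-- ===== Notes on version B (the rewrite author's own statement) =====
-- stated objective: alternative
-- what changed: Replaces A's single indexed loop with an early break by independent per-delimiter membership/index scans whose minimum gives the cut position, with a fast path returning the wrapped input when neither delimiter occurs.
import Mathlib
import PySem

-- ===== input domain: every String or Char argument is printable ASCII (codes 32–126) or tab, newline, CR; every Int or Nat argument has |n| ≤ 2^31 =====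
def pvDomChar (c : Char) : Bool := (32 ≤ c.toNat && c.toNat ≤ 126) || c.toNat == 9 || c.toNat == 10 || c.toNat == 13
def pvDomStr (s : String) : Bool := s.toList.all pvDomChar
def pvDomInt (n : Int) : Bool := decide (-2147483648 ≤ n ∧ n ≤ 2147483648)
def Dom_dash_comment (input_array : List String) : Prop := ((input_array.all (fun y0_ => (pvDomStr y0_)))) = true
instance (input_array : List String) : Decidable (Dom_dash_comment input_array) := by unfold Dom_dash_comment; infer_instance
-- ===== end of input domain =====

-- B replaces the single early-break index loop by per-delimiter membership/index scans plus a min; same values, alternative decomposition.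

-- ===== PORT A =====
-- the 'for element in range(len(input_array)) … break' loop, as recursion over the index list
def dash_comment_go (input_array : List String) : List Int → List (List String)
  | [] => [input_array]
  | e :: rest =>
    match PySem.List.pyGet? input_array e with
    | none => []  -- unreachable: e comes from range(len(input_array))
    | some v =>
      if v = "-" ∨ v = "_" then
        [PySem.List.slice input_array (some 0) (some e)]
      else
        dash_comment_go input_array rest

def dash_comment (input_array : List String) : List (List String) :=
  dash_comment_go input_array (PySem.List.pyRange 0 input_array.length 1)

-- ===== PORT B =====
def dash_comment_alt (input_array : List String) : List (List String) :=
  let hasDash := input_array.contains "-"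
  let hasUnder := input_array.contains "_"
  if !hasDash && !hasUnder then
    [input_array]
  else
    let cuts : List Nat :=
      (if hasDash then [(PySem.List.index? input_array "-").getD 0] else []) ++
      (if hasUnder then [(PySem.List.index? input_array "_").getD 0] else [])
    match PySem.List.min? cuts (fun x => x) with
    | none => []  -- unreachable: cuts is nonempty here
    | some m => [input_array.take m]

-- ===== PRECONDITION & SPEC =====
def Spec_dash_comment (input_array : List String) (out : List (List String)) : Prop := out = dash_comment_alt input_array
instance (input_array : List String) (out : List (List String)) : Decidable (Spec_dash_comment input_array out) := by unfold Spec_dash_comment; infer_instance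

-- ===== CLAIM (what is proved, stated in full; the proofs are below) =====
def Claim_equal_dash_comment : Prop := ∀ (input_array : List String), Dom_dash_comment input_array → Spec_dash_comment input_array (dash_comment input_array)

-- ===== LEMMAS AND PROOFS =====

def pvDelim (s : String) : Bool := s == "-" || s == "_"

-- canonical form both programs reduce to
def pvCanon (xs : List String) : List (List String) :=
  match xs.findIdx? pvDelim with
  | none => [xs]
  | some j => [xs.take j]

theorem dash_comment_go_eq (xs : List String) (suf : List String) :
    ∀ pre : List String, xs = pre ++ suf →
    dash_comment_go xs (PySem.List.pyRange (pre.length : Int) (xs.length : Int) 1) =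
      match suf.findIdx? pvDelim with
      | none => [xs]
      | some j => [xs.take (pre.length + j)] := by
  induction suf with
  | nil =>
    intro pre h
    subst h
    simp only [List.append_nil]
    rw [PySem.List.pyRange_one_eq_nil le_rfl]
    simp [dash_comment_go]
  | cons s t ih =>
    intro pre h
    have hlt : (pre.length : Int) < (xs.length : Int) := by
      subst h; simp
    rw [PySem.List.pyRange_one_cons hlt]
    have hget : PySem.List.pyGet? xs (pre.length : Int) = some s := by
      subst h; exact PySem.List.pyGet?_append_length pre t s
    by_cases hs : s = "-" ∨ s = "_"
    · have hp : pvDelim s = true := by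
        rcases hs with h1 | h1 <;> simp [pvDelim, h1]
      have hsl : PySem.List.slice xs (some 0) (some (pre.length : Int)) = xs.take pre.length := by
        rw [PySem.List.slice_toNat xs (by omega) (Int.natCast_nonneg _)]
        simp
      simp only [dash_comment_go, hget]
      rw [if_pos hs, List.findIdx?_cons, if_pos hp, hsl]
      simp
    · rw [not_or] at hs
      have hp : pvDelim s = false := by simp [pvDelim, hs.1, hs.2]
      simp only [dash_comment_go, hget]
      rw [if_neg (by tauto), List.findIdx?_cons, if_neg (by simp [hp])]
      have h2 : xs = (pre ++ [s]) ++ t := by simp [h]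
      have ihs := ih (pre ++ [s]) h2
      have hlen : ((pre ++ [s]).length : Int) = (pre.length : Int) + 1 := by simp
      rw [show (pre.length : Int) + 1 = ((pre ++ [s]).length : Int) from hlen.symm, ihs]
      cases hf : t.findIdx? pvDelim with
      | none => simp
      | some j =>
        simp only [Option.map_some]
        have : (pre ++ [s]).length + j = pre.length + (j + 1) := by simp; omega
        rw [this]

theorem dash_comment_eq_canon (xs : List String) : dash_comment xs = pvCanon xs := by
  have h := dash_comment_go_eq xs xs [] (by simp)
  simp only [List.length_nil, Nat.cast_zero, Nat.zero_add] at h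
  unfold dash_comment pvCanon
  rw [h]

theorem findIdx_two (xs : List String) :
    xs.findIdx? pvDelim =
      match PySem.List.index? xs "-", PySem.List.index? xs "_" with
      | none, none => none
      | some i, none => some i
      | none, some j => some j
      | some i, some j => some (min i j) := by
  induction xs with
  | nil => simp [PySem.List.index?]
  | cons x t ih =>
    by_cases hd : x = "-"
    · subst hd
      rw [List.findIdx?_cons, if_pos (by decide : pvDelim "-" = true),
          PySem.List.index?_cons_self "-" t,
          PySem.List.index?_cons_of_ne t (show ("-" : String) ≠ "_" by decide)]
      cases h2 : PySem.List.index? t "_" <;> simp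
    · by_cases hu : x = "_"
      · subst hu
        rw [List.findIdx?_cons, if_pos (by decide : pvDelim "_" = true),
            PySem.List.index?_cons_self "_" t,
            PySem.List.index?_cons_of_ne t (show ("_" : String) ≠ "-" by decide)]
        cases h1 : PySem.List.index? t "-" <;> simp
      · have hp : pvDelim x = false := by simp [pvDelim, hd, hu]
        rw [List.findIdx?_cons, if_neg (by simp [hp]),
            PySem.List.index?_cons_of_ne t hd,
            PySem.List.index?_cons_of_ne t hu, ih]
        cases h1 : PySem.List.index? t "-" <;> cases h2 : PySem.List.index? t "_" <;> simp

theorem dash_comment_alt_eq_canon (xs : List String) : dash_comment_alt xs = pvCanon xs := by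
  unfold dash_comment_alt pvCanon
  rw [findIdx_two]
  by_cases h1 : "-" ∈ xs <;> by_cases h2 : "_" ∈ xs
  · obtain ⟨a, ha⟩ := Option.isSome_iff_exists.1 ((PySem.List.index?_isSome_iff xs "-").2 h1)
    obtain ⟨b, hb⟩ := Option.isSome_iff_exists.1 ((PySem.List.index?_isSome_iff xs "_").2 h2)
    simp only [PySem.List.index?_eq_idxOf?] at ha hb
    simp [h1, h2, ha, hb, PySem.List.min?_id_cons]
  · obtain ⟨a, ha⟩ := Option.isSome_iff_exists.1 ((PySem.List.index?_isSome_iff xs "-").2 h1)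
    have i2 : PySem.List.index? xs "_" = none := (PySem.List.index?_eq_none_iff xs "_").2 h2
    simp only [PySem.List.index?_eq_idxOf?] at ha i2
    simp [h1, h2, ha, i2, PySem.List.min?_id_cons]
  · obtain ⟨b, hb⟩ := Option.isSome_iff_exists.1 ((PySem.List.index?_isSome_iff xs "_").2 h2)
    have i1 : PySem.List.index? xs "-" = none := (PySem.List.index?_eq_none_iff xs "-").2 h1
    simp only [PySem.List.index?_eq_idxOf?] at hb i1
    simp [h1, h2, hb, i1, PySem.List.min?_id_cons]
  · have i1 : PySem.List.index? xs "-" = none := (PySem.List.index?_eq_none_iff xs "-").2 h1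
    have i2 : PySem.List.index? xs "_" = none := (PySem.List.index?_eq_none_iff xs "_").2 h2
    simp only [PySem.List.index?_eq_idxOf?] at i1 i2
    simp [h1, h2, i1, i2]

-- ===== VERDICT (by name: the statement is the Claim_ definition above) =====
theorem dash_comment_spec : Claim_equal_dash_comment := by
  intro xs _
  unfold Spec_dash_comment
  rw [dash_comment_eq_canon, dash_comment_alt_eq_canon]
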